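-- pv_equiv track=rewrite | github.com/sukam09/kakao-coding-test | 2019 카카오 개발자 겨울 인턴십/문제 4.py | check
-- ===== SOURCE A (Python) =====
-- def check(mid, stones, k):
--     cnt = 0
--     for stone in stones:
--         stone = stone - mid
--         if stone < 0:
--             cnt += 1
--         else:
--             cnt = 0
--         if cnt == k:
--             return False
--     return True
-- ===== SOURCE B (Python) =====
-- def check(mid, stones, k):
--     # Walk the list run by run: measure the run of consecutive stones below
--     # mid starting at i, fail if it reaches k, otherwise jump past the run
--     # and the stone that ended it.
--     i, n = 0, len(stones)
--     while i < n:
--         j = i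
--         while j < n and stones[j] < mid:
--             j += 1
--         if j - i >= k:
--             return False
--         i = j + 1
--     return True
-- ===== Notes on version B (the rewrite author's own statement) =====
-- stated objective: alternative
-- what changed: Replaced the incremental reset-on-failure counter with a run-by-run walk: an inner scan measures each run of consecutive below-mid stones, fails if it reaches k, and the outer pointer jumps past the run and its terminating stone.
-- outside the precondition, e.g. on check(5, [1, 2], 0): A returns True, B returns False; on check(0, [1], -1): A returns True, B returns False
import Mathlib
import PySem

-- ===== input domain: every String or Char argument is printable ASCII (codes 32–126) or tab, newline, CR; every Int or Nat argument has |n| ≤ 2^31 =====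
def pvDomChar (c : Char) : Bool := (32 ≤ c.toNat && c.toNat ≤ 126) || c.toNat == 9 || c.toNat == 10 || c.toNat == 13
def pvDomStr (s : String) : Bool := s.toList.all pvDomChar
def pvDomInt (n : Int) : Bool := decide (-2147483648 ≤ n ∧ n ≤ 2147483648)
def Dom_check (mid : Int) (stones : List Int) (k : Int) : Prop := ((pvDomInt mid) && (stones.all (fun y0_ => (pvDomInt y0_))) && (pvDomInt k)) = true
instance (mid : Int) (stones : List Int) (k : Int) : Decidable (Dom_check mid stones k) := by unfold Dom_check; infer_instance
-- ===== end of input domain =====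

-- B walks the list run by run (leading below-mid run, fail if ≥ k, skip past it) instead of A's
-- reset-on-failure counter; same O(n) cost ("alternative"). Pre_ restricts k to positive windows.


-- ===== PORT A =====
def checkLoop (mid k : Int) (cnt : Int) : List Int → Bool
  | [] => true
  | stone :: rest =>
      let s := stone - mid
      let cnt' := if s < 0 then cnt + 1 else 0
      if cnt' = k then false else checkLoop mid k cnt' rest

def check (mid : Int) (stones : List Int) (k : Int) : Bool := checkLoop mid k 0 stones

-- ===== PORT B =====
-- length of the leading run of stones below mid (B's inner while loop)
def runLen (mid : Int) : List Int → Nat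
  | [] => 0
  | x :: xs => if x < mid then runLen mid xs + 1 else 0

-- B's outer while loop over the remaining suffix
def goB (mid k : Int) : List Int → Bool
  | [] => true
  | x :: xs =>
      let r := runLen mid (x :: xs)
      if k ≤ (r : Int) then false else goB mid k ((x :: xs).drop (r + 1))
termination_by xs => xs.length
decreasing_by simp

def check_alt (mid : Int) (stones : List Int) (k : Int) : Bool := goB mid k stones

-- ===== PRECONDITION & SPEC =====
-- Pre_ excludes nonpositive k (outside the task's natural domain of window sizes):
-- there A's `cnt == k` equality test fires accidentally (never for k < 0, and for k = 0
-- only after a not-below stone), while B naturally treats any run as reaching a window of size ≤ 0.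
def Pre_check (mid : Int) (stones : List Int) (k : Int) : Prop := 1 ≤ k
instance (mid : Int) (stones : List Int) (k : Int) : Decidable (Pre_check mid stones k) := by unfold Pre_check; infer_instance
def pvWitness_check : Int × List Int × Int := (5, [1, 2, 8, 1], 2)
def Spec_check (mid : Int) (stones : List Int) (k : Int) (out : Bool) : Prop := out = check_alt mid stones k
instance (mid : Int) (stones : List Int) (k : Int) (out : Bool) : Decidable (Spec_check mid stones k out) := by unfold Spec_check; infer_instance

-- ===== CLAIM (what is proved, stated in full; the proofs are below) =====
def Claim_equal_check : Prop := ∀ (mid : Int) (stones : List Int) (k : Int), Dom_check mid stones k → Pre_check mid stones k → Spec_check mid stones k (check mid stones k)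

-- ===== LEMMAS AND PROOFS =====

-- goB satisfies its one-step unfolding on every list (including []) when k ≥ 1
lemma goB_eq (mid k : Int) (hk : 1 ≤ k) (xs : List Int) :
    goB mid k xs =
      if k ≤ (runLen mid xs : Int) then false else goB mid k (xs.drop (runLen mid xs + 1)) := by
  cases xs with
  | nil =>
      have h : ¬ k ≤ ((runLen mid ([] : List Int) : Int)) := by simp [runLen]; omega
      rw [if_neg h]
      simp [runLen, goB]
  | cons x xs => rw [goB]

-- A's loop, run with counter cnt (0 ≤ cnt < k), equals B's run-by-run walk
lemma loop_eq (mid k : Int) (hk : 1 ≤ k) :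
    ∀ (xs : List Int) (cnt : Int), 0 ≤ cnt → cnt < k →
      checkLoop mid k cnt xs =
        if k ≤ cnt + (runLen mid xs : Int) then false
        else goB mid k (xs.drop (runLen mid xs + 1)) := by
  intro xs
  induction xs with
  | nil =>
      intro cnt h0 hlt
      have h : ¬ k ≤ cnt + ((runLen mid ([] : List Int) : Int)) := by simp [runLen]; omega
      rw [if_neg h]
      simp [checkLoop, runLen, goB]
  | cons x xs ih =>
      intro cnt h0 hlt
      by_cases hb : x - mid < 0
      · have hb' : x < mid := by omega
        by_cases he : cnt + 1 = k
        · have h : k ≤ cnt + ((runLen mid (x :: xs) : Int)) := by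
            have : (0 : Int) ≤ (runLen mid xs : Int) := by positivity
            simp [runLen, hb']; push_cast; omega
          simp [checkLoop, hb, he, h]
        · have hlt' : cnt + 1 < k := by omega
          have := ih (cnt + 1) (by omega) hlt'
          simp only [checkLoop, if_pos hb, if_neg he] at *
          rw [this]
          have hcond : (k ≤ cnt + 1 + (runLen mid xs : Int)) ↔
              (k ≤ cnt + (runLen mid (x :: xs) : Int)) := by
            simp [runLen, hb']; push_cast; omega
          have hdrop : xs.drop (runLen mid xs + 1) =
              (x :: xs).drop (runLen mid (x :: xs) + 1) := by
            simp [runLen, hb', List.drop]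
          by_cases hc : k ≤ cnt + 1 + (runLen mid xs : Int)
          · rw [if_pos hc, if_pos (hcond.mp hc)]
          · rw [if_neg hc, if_neg (fun h => hc (hcond.mpr h)), hdrop]
      · have hb' : ¬ x < mid := by omega
        have hzk : ¬ (0 : Int) = k := by omega
        have hrun : runLen mid (x :: xs) = 0 := by simp [runLen, hb']
        have hcond : ¬ k ≤ cnt + ((runLen mid (x :: xs) : Int)) := by
          rw [hrun]; push_cast; omega
        simp only [checkLoop, if_neg hb, if_pos rfl, if_neg hzk]
        rw [ih 0 le_rfl (by omega), if_neg hcond, hrun]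
        simp only [Nat.zero_add, List.drop_one, List.tail_cons, zero_add]
        exact (goB_eq mid k hk xs).symm

-- ===== VERDICT (by name: the statement is the Claim_ definition above) =====
theorem check_spec : Claim_equal_check := by
  intro mid stones k _ hpre
  unfold Spec_check check check_alt
  have hk : 1 ≤ k := hpre
  rw [loop_eq mid k hk stones 0 le_rfl (by omega)]
  simp only [zero_add]
  exact (goB_eq mid k hk stones).symm
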